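-- pv_equiv track=rewrite | github.com/P0rtOs/BIS | lab1.py | mul_small_dec
-- ===== SOURCE A (Python) =====
-- def _strip_leading_zeros(s: str) -> str:
--     s = s.lstrip('0')
--     return s if s else '0'
--
-- def _validate_dec_str(s: str) -> str:
--     if s is None:
--         raise ValueError("Порожнє значення")
--     s = str(s).strip()
--     if not s:
--         raise ValueError("Порожній рядок")
--     if any(ch < '0' or ch > '9' for ch in s):
--         raise ValueError(f"Невалідні символи {s!r}")
--     return _strip_leading_zeros(s)
--
-- def mul_small_dec(a: str, k: int) -> str:
--     a = _validate_dec_str(a)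
--     if k < 0:
--         raise ValueError("k від'ємне")
--     if a == '0' or k == 0:
--         return '0'
--
--     carry = 0
--     out = []
--     for i in range(len(a) - 1, -1, -1):
--         da = ord(a[i]) - 48
--         prod = da * k + carry
--         out.append(chr((prod % 10) + 48))
--         carry = prod // 10
--     while carry:
--         out.append(chr((carry % 10) + 48))
--         carry //= 10
--     return _strip_leading_zeros(''.join(reversed(out)))
-- ===== SOURCE B (Python) =====
-- def mul_small_dec(a: str, k: int) -> str:
--     if a is None:
--         raise ValueError("Порожнє значення")
--     s = str(a).strip()
--     if not s:
--         raise ValueError("Порожній рядок")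
--     if any(ch < '0' or ch > '9' for ch in s):
--         raise ValueError(f"Невалідні символи {s!r}")
--     if k < 0:
--         raise ValueError("k від'ємне")
--     n = 0
--     for ch in s:
--         n = n * 10 + (ord(ch) - 48)
--     return str(n * k)
-- ===== Notes on version B (the rewrite author's own statement) =====
-- stated objective: simpler
-- what changed: A multiplies digit by digit with manual carry propagation, flushes the carry, reverses and strips the result; B accumulates the decimal value of the string once by Horner's rule and lets the library integer-to-string conversion produce the product's digits.
import Mathlib
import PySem

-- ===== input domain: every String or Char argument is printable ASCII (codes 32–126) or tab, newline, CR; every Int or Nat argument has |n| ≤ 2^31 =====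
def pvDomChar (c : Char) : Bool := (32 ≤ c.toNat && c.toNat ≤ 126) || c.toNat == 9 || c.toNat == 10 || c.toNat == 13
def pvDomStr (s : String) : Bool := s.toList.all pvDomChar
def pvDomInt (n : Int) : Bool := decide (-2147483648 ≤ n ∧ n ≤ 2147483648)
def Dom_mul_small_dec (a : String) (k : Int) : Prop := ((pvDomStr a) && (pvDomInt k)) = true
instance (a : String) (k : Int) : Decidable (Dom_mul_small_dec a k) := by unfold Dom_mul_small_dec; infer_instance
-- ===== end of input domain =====

-- B replaces A's hand-written schoolbook multiply (per-digit products, carry propagation,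
-- reversal and zero-stripping) by a single Horner accumulation of the decimal value followed
-- by the library integer-to-string conversion; objective: simpler.

-- ===== PORT A =====
-- _strip_leading_zeros: s.lstrip('0') drops exactly the leading '0' characters (exact port)
def pvStripLZ (s : List Char) : List Char :=
  let t := s.dropWhile (fun c => c == '0')
  if t.isEmpty then ['0'] else t

-- _validate_dec_str: none = ValueError (blank after strip, or a non-digit character)
def pvValidateDec? (s : String) : Option (List Char) :=
  let t := PySem.Chars.strip s.toList
  if t.isEmpty then none
  else if t.any (fun ch => decide (ch < '0') || decide ('9' < ch)) then none
  else some (pvStripLZ t)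

-- the 'for i in range(len(a)-1, -1, -1)' body: walks the digit chars from the last to the
-- first (here: over ds.reverse), appending chr(prod % 10 + 48) and carrying prod // 10
def pvMulLoop (k : Int) : List Char → Int → List Char → List Char × Int
  | [], carry, out => (out, carry)
  | c :: rest, carry, out =>
    let prod := ((c.toNat : Int) - 48) * k + carry
    pvMulLoop k rest (PySem.Int.floordiv prod 10)
      (out ++ [Char.ofNat ((PySem.Int.mod prod 10).toNat + 48)])

-- the 'while carry:' flush; called with carry.toNat — on the only branch that reaches it
-- k > 0 and the digits are ≥ 0, so carry ≥ 0 and the Nat recursion is exact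
def pvFlushCarry (c : Nat) : List Char :=
  if h : c = 0 then [] else Char.ofNat (c % 10 + 48) :: pvFlushCarry (c / 10)
termination_by c
decreasing_by exact Nat.div_lt_self (Nat.pos_of_ne_zero h) (by norm_num)

def mul_small_dec (a : String) (k : Int) : String :=
  match pvValidateDec? a with
  | none => ""            -- raise ValueError (excluded by Pre_)
  | some ds =>
    if k < 0 then ""      -- raise ValueError "k від'ємне" (excluded by Pre_)
    else if ds == ['0'] || k == 0 then "0"
    else
      let p := pvMulLoop k ds.reverse 0 []
      String.ofList (pvStripLZ ((p.1 ++ pvFlushCarry p.2.toNat).reverse))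

-- ===== PORT B =====
def mul_small_dec_alt (a : String) (k : Int) : String :=
  let t := PySem.Chars.strip a.toList
  if t.isEmpty then ""    -- raise ValueError (excluded by Pre_)
  else if t.any (fun ch => decide (ch < '0') || decide ('9' < ch)) then ""  -- raise (excluded)
  else if k < 0 then ""   -- raise (excluded by Pre_)
  else PySem.Int.toStr ((t.foldl (fun n c => n * 10 + ((c.toNat : Int) - 48)) 0) * k)

-- ===== PRECONDITION & SPEC =====
-- Pre_ = exactly the inputs where A returns: the stripped string is a nonempty run of
-- ASCII digits and k is nonnegative (otherwise A raises ValueError).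
def Pre_mul_small_dec (a : String) (k : Int) : Prop :=
  (PySem.Chars.strip a.toList ≠ [] ∧
    (PySem.Chars.strip a.toList).all (fun c => decide ('0' ≤ c) && decide (c ≤ '9')) = true) ∧
  0 ≤ k
instance (a : String) (k : Int) : Decidable (Pre_mul_small_dec a k) := by
  unfold Pre_mul_small_dec; infer_instance

def pvWitness_mul_small_dec : String × Int := ("12", 3)

def Spec_mul_small_dec (a : String) (k : Int) (out : String) : Prop := out = mul_small_dec_alt a k
instance (a : String) (k : Int) (out : String) : Decidable (Spec_mul_small_dec a k out) := by
  unfold Spec_mul_small_dec; infer_instance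

-- ===== CLAIM (what is proved, stated in full; the proofs are below) =====
def Claim_equal_mul_small_dec : Prop := ∀ (a : String) (k : Int), Dom_mul_small_dec a k → Pre_mul_small_dec a k → Spec_mul_small_dec a k (mul_small_dec a k)

-- ===== LEMMAS AND PROOFS =====

-- the char for digit d (d < 10): chr(d + 48)
def pvDChar (d : Nat) : Char := Char.ofNat (d + 48)

-- digit value of a digit char
def pvDVal (c : Char) : Nat := c.toNat - 48

theorem pv_ofDigits_all_zero (l : List Nat) (h : ∀ x ∈ l, x = 0) : Nat.ofDigits 10 l = 0 := by
  induction l with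
  | nil => rfl
  | cons x l ih =>
    rw [Nat.ofDigits_cons, h x (by simp), ih (fun y hy => h y (by simp [hy]))]

theorem pv_digitChar_eq (d : Nat) (h : d < 10) : Nat.digitChar d = pvDChar d := by
  unfold pvDChar
  interval_cases d <;> decide

theorem pv_dropWhile_congr {α : Type} (p q : α → Bool) (l : List α)
    (h : ∀ x ∈ l, p x = q x) : l.dropWhile p = l.dropWhile q := by
  induction l with
  | nil => rfl
  | cons a l ih =>
    simp only [List.dropWhile_cons]
    rw [h a (by simp)]
    cases hq : q a
    · simp
    · simpa [hq] using ih (fun x hx => h x (by simp [hx]))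

theorem pv_horner_eq (cs : List Char) (acc : Int) (h : ∀ c ∈ cs, 48 ≤ c.toNat) :
    cs.foldl (fun n c => n * 10 + ((c.toNat : Int) - 48)) acc
      = acc * 10 ^ cs.length + ((Nat.ofDigits 10 ((cs.map pvDVal).reverse) : Nat) : Int) := by
  induction cs generalizing acc with
  | nil => simp [Nat.ofDigits_nil]
  | cons c rest ih =>
    have hc : 48 ≤ c.toNat := h c (by simp)
    have hrest : ∀ x ∈ rest, 48 ≤ x.toNat := fun x hx => h x (by simp [hx])
    simp only [List.foldl_cons, List.map_cons, List.reverse_cons, List.length_cons]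
    rw [ih _ hrest]
    have happ : Nat.ofDigits 10 ((rest.map pvDVal).reverse ++ [pvDVal c])
        = Nat.ofDigits 10 ((rest.map pvDVal).reverse) + 10 ^ rest.length * pvDVal c := by
      rw [Nat.ofDigits_append, Nat.ofDigits_singleton]
      simp
    rw [happ]
    have hval : ((pvDVal c : Nat) : Int) = (c.toNat : Int) - 48 := by
      unfold pvDVal; omega
    push_cast [hval]
    ring

theorem pv_loop_spec (K : Nat) (cs : List Char) (C : Nat) (out : List Char)
    (h : ∀ c ∈ cs, 48 ≤ c.toNat ∧ c.toNat ≤ 57) :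
    ∃ (ls : List Nat) (cf : Nat),
      pvMulLoop (K : Int) cs (C : Int) out = (out ++ ls.map pvDChar, (cf : Int)) ∧
      ls.length = cs.length ∧
      (∀ d ∈ ls, d < 10) ∧
      Nat.ofDigits 10 ls + 10 ^ cs.length * cf = Nat.ofDigits 10 (cs.map pvDVal) * K + C := by
  induction cs generalizing C out with
  | nil => exact ⟨[], C, by simp [pvMulLoop], rfl, by simp, by simp [Nat.ofDigits_nil]⟩
  | cons c rest ih =>
    obtain ⟨hc48, hc57⟩ := h c (by simp)
    have hrest : ∀ x ∈ rest, 48 ≤ x.toNat ∧ x.toNat ≤ 57 := fun x hx => h x (by simp [hx])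
    set P : Nat := pvDVal c * K + C with hP
    have hprod : ((c.toNat : Int) - 48) * (K : Int) + (C : Int) = ((P : Nat) : Int) := by
      rw [hP]; unfold pvDVal; push_cast [Nat.cast_sub hc48]; ring
    have hfd : PySem.Int.floordiv ((P : Nat) : Int) 10 = ((P / 10 : Nat) : Int) := by
      exact_mod_cast PySem.Int.floordiv_natCast P 10
    have hmd : PySem.Int.mod ((P : Nat) : Int) 10 = ((P % 10 : Nat) : Int) := by
      exact_mod_cast PySem.Int.mod_natCast P 10
    obtain ⟨ls', cf, heq, hlen, hlt, hv⟩ := ih (P / 10) (out ++ [pvDChar (P % 10)]) hrest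
    refine ⟨P % 10 :: ls', cf, ?_, ?_, ?_, ?_⟩
    · show pvMulLoop (K : Int) (c :: rest) (C : Int) out = _
      rw [pvMulLoop]
      simp only [hprod, hfd, hmd]
      have hch : Char.ofNat ((((P % 10 : Nat) : Int)).toNat + 48) = pvDChar (P % 10) := by
        show Char.ofNat ((((P % 10 : Nat) : Int)).toNat + 48) = Char.ofNat (P % 10 + 48)
        congr 1
      rw [hch, heq, List.append_assoc]
      rfl
    · simp [hlen]
    · intro d hd
      rcases List.mem_cons.1 hd with h1 | h1
      · omega
      · exact hlt d h1
    · simp only [List.map_cons, List.length_cons, Nat.ofDigits_cons, pow_succ]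
      have hdm : 10 * (P / 10) + P % 10 = P := Nat.div_add_mod P 10
      have hv' : Nat.ofDigits 10 ls' + 10 ^ rest.length * cf
          = Nat.ofDigits 10 (rest.map pvDVal) * K + P / 10 := hv
      nlinarith [hv', hdm]

theorem pv_flush_spec (c : Nat) : pvFlushCarry c = (Nat.digits 10 c).map pvDChar := by
  induction c using Nat.strong_induction_on with
  | _ c ih =>
    rw [pvFlushCarry]
    by_cases h : c = 0
    · simp [h]
    · rw [dif_neg h, Nat.digits_def' (by norm_num : (1:Nat) < 10) (Nat.pos_of_ne_zero h)]
      rw [ih (c / 10) (Nat.div_lt_self (Nat.pos_of_ne_zero h) (by norm_num))]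
      rfl

theorem pv_toDigitsCore_eq (fuel : Nat) : ∀ (n : Nat) (ds : List Char), n < 10 ^ (fuel + 1) →
    Nat.toDigitsCore 10 (fuel + 1) n ds
      = (if n = 0 then ['0'] else ((Nat.digits 10 n).map pvDChar).reverse) ++ ds := by
  induction fuel with
  | zero =>
    intro n ds hn
    have hd : n / 10 = 0 := Nat.div_eq_of_lt (by simpa using hn)
    rw [Nat.toDigitsCore]
    simp only [hd, if_true]
    by_cases h0 : n = 0
    · simp [h0]
      decide
    · rw [if_neg h0, Nat.digits_def' (by norm_num : (1:Nat) < 10) (Nat.pos_of_ne_zero h0), hd]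
      simp [Nat.mod_eq_of_lt (by simpa using hn),
        pv_digitChar_eq n (by simpa using hn)]
  | succ fuel ih =>
    intro n ds hn
    rw [Nat.toDigitsCore]
    by_cases hd : n / 10 = 0
    · have hnlt : n < 10 := by omega
      simp only [hd, if_true]
      by_cases h0 : n = 0
      · simp [h0]
        decide
      · rw [if_neg h0, Nat.digits_def' (by norm_num : (1:Nat) < 10) (Nat.pos_of_ne_zero h0), hd]
        simp [Nat.mod_eq_of_lt hnlt, pv_digitChar_eq n hnlt]
    · rw [if_neg hd]
      have hlt : n / 10 < 10 ^ (fuel + 1) := by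
        have : n < 10 ^ (fuel + 2) := hn
        have h10 : n / 10 < 10 ^ (fuel + 2) / 10 + 1 := by
          have := Nat.div_le_div_right (c := 10) (Nat.le_of_lt_succ (Nat.lt_succ_of_lt hn))
          omega
        have : 10 ^ (fuel + 2) / 10 = 10 ^ (fuel + 1) := by
          rw [pow_succ]
          exact Nat.mul_div_cancel _ (by norm_num)
        omega
      rw [ih (n / 10) _ hlt, if_neg hd]
      have h0 : n ≠ 0 := by
        intro h0; exact hd (by simp [h0])
      rw [if_neg h0, Nat.digits_def' (by norm_num : (1:Nat) < 10) (Nat.pos_of_ne_zero h0)]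
      simp [pv_digitChar_eq (n % 10) (Nat.mod_lt _ (by norm_num))]

theorem pv_toDigits_eq (N : Nat) :
    Nat.toDigits 10 N = if N = 0 then ['0'] else ((Nat.digits 10 N).map pvDChar).reverse := by
  have h1 : N < 10 ^ (N + 1) := by
    calc N < 10 ^ N := Nat.lt_pow_self (by norm_num)
    _ ≤ 10 ^ (N + 1) := Nat.pow_le_pow_right (by norm_num) (by omega)
  simpa using pv_toDigitsCore_eq N N [] h1

theorem pv_strip_canon (le : List Nat) (hlt : ∀ d ∈ le, d < 10)
    (hpos : Nat.ofDigits 10 le ≠ 0) :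
    pvStripLZ ((le.map pvDChar).reverse)
      = ((Nat.digits 10 (Nat.ofDigits 10 le)).map pvDChar).reverse := by
  have hr : ∀ d ∈ le.reverse, d < 10 := fun d hd => hlt d (List.mem_reverse.1 hd)
  have hmapdrop : (le.map pvDChar).reverse.dropWhile (fun c => c == '0')
      = ((le.reverse.dropWhile (fun d => d == 0)).map pvDChar) := by
    rw [← List.map_reverse, List.dropWhile_map]
    congr 1
    apply pv_dropWhile_congr
    intro d hd
    have : d < 10 := hr d hd
    show ((fun c => c == '0') (pvDChar d)) = (d == 0)
    unfold pvDChar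
    interval_cases d <;> decide
  set q : List Nat := le.reverse.dropWhile (fun d => d == 0) with hq
  have hzeros : ∀ x ∈ le.reverse.takeWhile (fun d => d == 0), x = 0 := by
    intro x hx
    simpa using List.mem_takeWhile_imp hx
  have hsplit : le = q.reverse ++ (le.reverse.takeWhile (fun d => d == 0)).reverse := by
    rw [hq, ← List.reverse_append, List.takeWhile_append_dropWhile, List.reverse_reverse]
  have hofq : Nat.ofDigits 10 le = Nat.ofDigits 10 q.reverse := by
    conv_lhs => rw [hsplit]
    rw [Nat.ofDigits_append,
      pv_ofDigits_all_zero _ (fun x hx => hzeros x (List.mem_reverse.1 hx))]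
    ring
  have hqne : q ≠ [] := by
    intro hnil
    apply hpos
    rw [hofq, hnil]
    simp
  have hdig : Nat.digits 10 (Nat.ofDigits 10 le) = q.reverse := by
    rw [hofq]
    apply Nat.digits_ofDigits 10 (by norm_num)
    · intro d hd
      exact hlt d (by
        have : d ∈ q := List.mem_reverse.1 hd
        have : d ∈ le.reverse := (List.dropWhile_sublist _).subset this
        exact List.mem_reverse.1 this)
    · intro hne
      rw [List.getLast_reverse]
      have := List.head_dropWhile_not (fun d => d == 0) (l := le.reverse)
        (by simpa [hq] using hqne)
      simpa [hq] using this
  unfold pvStripLZ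
  simp only [hmapdrop]
  rw [if_neg (by simp [hqne])]
  rw [hdig, ← List.map_reverse, List.reverse_reverse]

theorem pv_digit_bounds (c : Char) (h1 : '0' ≤ c) (h2 : c ≤ '9') :
    48 ≤ c.toNat ∧ c.toNat ≤ 57 := by
  rw [Char.le_def] at h1 h2
  rw [UInt32.le_iff_toNat_le] at h1 h2
  exact ⟨h1, h2⟩

-- value of the whitespace-stripped digit string equals the value of its zero-stripped form
theorem pv_val_dropWhile (t : List Char) :
    Nat.ofDigits 10 ((t.map pvDVal).reverse)
      = Nat.ofDigits 10 (((t.dropWhile (fun c => c == '0')).map pvDVal).reverse) := by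
  conv_lhs => rw [← List.takeWhile_append_dropWhile (p := fun c => c == '0') (l := t)]
  rw [List.map_append, List.reverse_append, Nat.ofDigits_append]
  have hz : Nat.ofDigits 10 ((t.takeWhile (fun c => c == '0')).map pvDVal).reverse = 0 := by
    apply pv_ofDigits_all_zero
    intro x hx
    rw [List.mem_reverse, List.mem_map] at hx
    obtain ⟨c, hc, rfl⟩ := hx
    have hc0 := List.mem_takeWhile_imp hc
    have : c = '0' := by simpa using hc0
    simp [this, pvDVal]
  rw [hz]
  ring

theorem pv_dropWhile_head {α : Type} (p : α → Bool) (l : List α) (c : α) (tl : List α)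
    (h : l.dropWhile p = c :: tl) : p c = false := by
  induction l with
  | nil => simp at h
  | cons x xs ih =>
    rw [List.dropWhile_cons] at h
    by_cases hp : p x
    · exact ih (by simpa [hp] using h)
    · simp only [hp, Bool.false_eq_true, if_false] at h
      injection h with h1 _
      rw [← h1]
      simpa using hp

-- ===== VERDICT (by name: the statement is the Claim_ definition above) =====
theorem mul_small_dec_spec : Claim_equal_mul_small_dec := by
  intro a k _ hpre
  obtain ⟨⟨hne, hallb⟩, hk0⟩ := hpre
  unfold Spec_mul_small_dec mul_small_dec mul_small_dec_alt pvValidateDec?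
  set t := PySem.Chars.strip a.toList with ht
  have hdig : ∀ c ∈ t, '0' ≤ c ∧ c ≤ '9' := by
    intro c hc
    have := List.all_eq_true.1 hallb c hc
    simpa using this
  have hbt : ∀ c ∈ t, 48 ≤ c.toNat ∧ c.toNat ≤ 57 := fun c hc =>
    pv_digit_bounds c (hdig c hc).1 (hdig c hc).2
  have htE : t.isEmpty = false := by simpa using hne
  have hany : t.any (fun ch => decide (ch < '0') || decide ('9' < ch)) = false := by
    rw [List.any_eq_false]
    intro c hc
    obtain ⟨h1, h2⟩ := hdig c hc
    simp [not_lt.2 h1, not_lt.2 h2]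
  have hk0' : ¬ k < 0 := not_lt.2 hk0
  simp only [htE, hany, Bool.false_eq_true, if_false, if_neg hk0']
  rw [pv_horner_eq t 0 (fun c hc => (hbt c hc).1)]
  set Vt : Nat := Nat.ofDigits 10 ((t.map pvDVal).reverse) with hVt
  set u : List Char := t.dropWhile (fun c => c == '0') with hu
  cases huE : u.isEmpty with
  | true =>
    -- all of t is '0': A takes the ds == ['0'] branch, B computes 0 * k
    have hunil : u = [] := List.isEmpty_iff.1 huE
    have hds : pvStripLZ t = ['0'] := by
      unfold pvStripLZ
      rw [← hu, hunil]
      simp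
    have hV0 : Vt = 0 := by
      rw [hVt]
      apply pv_ofDigits_all_zero
      intro x hx
      rw [List.mem_reverse, List.mem_map] at hx
      obtain ⟨c, hc, rfl⟩ := hx
      have hall : ∀ x ∈ t, (x == '0') = true :=
        List.dropWhile_eq_nil_iff.1 (by rw [← hu]; exact hunil)
      have : c = '0' := by simpa using hall c hc
      simp [this, pvDVal]
    rw [hds, hV0]
    norm_num
    decide
  | false =>
    -- u ≠ []: ds = u
    have huNe : u ≠ [] := by
      intro h
      rw [h] at huE
      simp at huE
    have hds : pvStripLZ t = u := by
      unfold pvStripLZ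
      rw [← hu]
      simp [huE]
    rw [hds]
    obtain ⟨c0, rest', hcons⟩ := List.exists_cons_of_ne_nil huNe
    have hc0f : (c0 == '0') = false :=
      pv_dropWhile_head (fun c => c == '0') t c0 rest' (by rw [← hu]; exact hcons)
    have hc0ne : c0 ≠ '0' := by simpa using hc0f
    by_cases hk : k = 0
    · -- k = 0: both sides are "0"
      subst hk
      norm_num
      decide
    · -- main branch
      have hune0 : (u == ['0']) = false := by
        apply beq_eq_false_iff_ne.2
        intro hcon
        have h2 : c0 :: rest' = ['0'] := by rw [← hcons, hcon]
        injection h2 with h3 _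
        exact hc0ne h3
      have hkne : (k == 0) = false := beq_eq_false_iff_ne.2 hk
      rw [hune0, hkne]
      simp only [Bool.or_self, Bool.false_eq_true, if_false]
      -- set up the Nat multiplier
      set K : Nat := k.toNat with hK
      have hkK : k = (K : Int) := by omega
      have hKpos : 0 < K := by omega
      -- the digit loop
      have hbu : ∀ c ∈ u.reverse, 48 ≤ c.toNat ∧ c.toNat ≤ 57 := by
        intro c hc
        apply hbt
        rw [List.mem_reverse] at hc
        exact (List.dropWhile_sublist _).subset (hu ▸ hc)
      obtain ⟨ls, cf, heq, hlen, hlt10, hval⟩ := pv_loop_spec K u.reverse 0 [] hbu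
      rw [hkK]
      have heq' : pvMulLoop (K : Int) u.reverse 0 [] = (ls.map pvDChar, (cf : Int)) := by
        simpa using heq
      rw [heq']
      simp only
      -- the flushed carry
      rw [pv_flush_spec]
      have htoNat : ((cf : Int)).toNat = cf := by omega
      rw [htoNat]
      rw [← List.map_append]
      -- the value represented by the full little-endian digit list
      set le : List Nat := ls ++ Nat.digits 10 cf with hle
      set Vu : Nat := Nat.ofDigits 10 ((u.map pvDVal).reverse) with hVu
      have hN : Nat.ofDigits 10 le = Vu * K := by
        rw [hle, Nat.ofDigits_append, Nat.ofDigits_digits, hlen]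
        have : Nat.ofDigits 10 (u.reverse.map pvDVal) = Vu := by
          rw [hVu, List.map_reverse]
        rw [← this]
        simpa using hval
      have hlelt : ∀ d ∈ le, d < 10 := by
        intro d hd
        rw [hle, List.mem_append] at hd
        rcases hd with hd | hd
        · exact hlt10 d hd
        · exact Nat.digits_lt_base (by norm_num) hd
      -- Vu ≥ 1 since u's head is a nonzero digit
      have hVupos : 0 < Vu := by
        have hc0 : c0 ∈ u := by rw [hcons]; simp
        have hb0 := hbt c0 ((List.dropWhile_sublist _).subset (hu ▸ hc0))
        have hv1 : 1 ≤ pvDVal c0 := by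
          unfold pvDVal
          have : c0.toNat ≠ 48 := by
            intro hcon
            apply hc0ne
            apply Char.ext
            apply UInt32.toNat_inj.1
            simpa using hcon
          omega
        rw [hVu, hcons]
        simp only [List.map_cons, List.reverse_cons]
        rw [Nat.ofDigits_append, Nat.ofDigits_singleton]
        have h10 : 0 < 10 ^ ((rest'.map pvDVal).reverse).length :=
          pow_pos (by norm_num) _
        have hmul : 10 ^ ((rest'.map pvDVal).reverse).length * 1
            ≤ 10 ^ ((rest'.map pvDVal).reverse).length * pvDVal c0 :=
          Nat.mul_le_mul_left _ hv1
        omega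
      have hNne : Nat.ofDigits 10 le ≠ 0 := by
        rw [hN]
        exact Nat.mul_ne_zero (by omega) (by omega)
      -- A's stripped reversal is the canonical digit string
      rw [pv_strip_canon le hlelt hNne]
      -- B's integer-to-string is the same canonical digit string
      have hVtVu : Vt = Vu := by
        rw [hVt, hVu, hu]
        exact pv_val_dropWhile t
      have hBval : ((Vt : Nat) : Int) * (K : Int) = ((Vu * K : Nat) : Int) := by
        rw [hVtVu]; push_cast; ring
      rw [zero_mul, zero_add, hBval]
      rw [← String.toList_inj]
      rw [String.toList_ofList, PySem.Int.toList_toStr]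
      unfold PySem.Int.toChars
      rw [if_neg (by omega)]
      have : ((Vu * K : Nat) : Int).toNat = Vu * K := by omega
      rw [this]
      rw [pv_toDigits_eq, if_neg (by rw [← hN]; exact hNne), hN]
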